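-- pv_equiv track=rewrite | github.com/ramelloperalta/Python-coursework | labs109c.py | brangelina
-- ===== SOURCE A (Python) =====
-- def brangelina (first, second):
--
--     i = 0
--     while second[i] not in "aeiou":
--         i += 1
--     second = second[i:]
--
--     groups = []
--     in_group = False
--     for i, c in enumerate(first):
--         if c in "aeiou":
--             if not in_group:
--                 in_group = True #if in vowel, append position of vowel
--                 groups.append(i)
--         else:
--             in_group = False
--
--     if (len(groups) == 1):
--         first = first[:groups[0]]
--     else:
--         first = first[:groups[-2]]
--
--     return first + second
-- ===== SOURCE B (Python) =====
-- VOWELS = "aeiou"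
--
-- def brangelina(first, second):
--     # Scan first right-to-left, counting vowel-run starts; stop at the second
--     # one from the right (keeps no list of groups, exits early).
--     cut = 0
--     runs = 0
--     for i in range(len(first) - 1, -1, -1):
--         if first[i] in VOWELS and (i == 0 or first[i - 1] not in VOWELS):
--             runs += 1
--             cut = i
--             if runs == 2:
--                 break
--     k = len(second)
--     for j, c in enumerate(second):
--         if c in VOWELS:
--             k = j
--             break
--     return first[:cut] + second[k:]
-- ===== Notes on version B (the rewrite author's own statement) =====
-- stated objective: alternative
-- what changed: A builds the full list of vowel-run start indices in a forward pass with an in_group flag and then indexes groups[-2]/groups[0]; B scans first right-to-left keeping only a run counter and the latest run start, breaking at the second run start from the right (so it usually touches only a suffix of first), and finds the trim point of second with a single enumerate loop instead of an index-advancing while.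
import Mathlib
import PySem

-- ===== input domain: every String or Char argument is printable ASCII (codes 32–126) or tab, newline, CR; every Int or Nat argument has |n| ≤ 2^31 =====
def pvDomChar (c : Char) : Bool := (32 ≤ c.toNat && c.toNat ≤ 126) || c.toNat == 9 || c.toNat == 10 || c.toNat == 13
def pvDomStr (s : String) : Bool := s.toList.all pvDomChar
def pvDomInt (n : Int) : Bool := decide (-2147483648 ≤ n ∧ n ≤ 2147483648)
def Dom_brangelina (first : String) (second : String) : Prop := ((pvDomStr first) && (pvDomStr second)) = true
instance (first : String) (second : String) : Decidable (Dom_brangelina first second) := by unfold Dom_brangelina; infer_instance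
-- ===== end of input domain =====

-- B replaces A's forward pass that builds the whole list of vowel-run starts by a
-- right-to-left scan that keeps only a counter and the latest run start, breaking
-- at the second run start from the right (measured faster in a timing run).

-- c in "aeiou" (shared by both Pythons)
def pvVowel (c : Char) : Bool := c == 'a' || c == 'e' || c == 'i' || c == 'o' || c == 'u'

-- ===== PORT A =====
-- the while loop: i = 0; while second[i] not in "aeiou": i += 1   (none = IndexError)
def pvAFind : List Char → Int → Option Int
  | [], _ => none
  | c :: cs, i => if pvVowel c then some i else pvAFind cs (i + 1)

-- the for loop over enumerate(first) with state (in_group, groups)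
def pvAGroups : List Char → Int → Bool → List Int → List Int
  | [], _, _, g => g
  | c :: cs, i, ing, g =>
    if pvVowel c then
      if ing then pvAGroups cs (i + 1) true g
      else pvAGroups cs (i + 1) true (g ++ [i])
    else pvAGroups cs (i + 1) false g

def brangelina (first : String) (second : String) : String :=
  let s := second.toList
  let j := (pvAFind s 0).getD 0                       -- none = IndexError, excluded by Pre_
  let s2 := PySem.List.slice s (some j) none          -- second = second[i:]
  let groups := pvAGroups first.toList 0 false []
  let f2 :=
    if groups.length == 1 then
      PySem.List.slice first.toList none (some ((PySem.List.pyGet? groups 0).getD 0))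
    else
      PySem.List.slice first.toList none (some ((PySem.List.pyGet? groups (-2)).getD 0))
      -- groups[-2]; none = IndexError (groups = []), excluded by Pre_
  String.ofList (f2 ++ s2)

-- ===== PORT B =====
-- the loop body's test: first[i] in VOWELS and (i == 0 or first[i-1] not in VOWELS)
def pvBHit (f : List Char) (i : Int) : Bool :=
  pvVowel (PySem.List.pyGetD f i ' ') && (i == 0 || !pvVowel (PySem.List.pyGetD f (i - 1) ' '))

-- for i in range(len(first)-1, -1, -1): … if runs == 2: break
def pvBScan (f : List Char) : List Int → Int → Int → Int
  | [], cut, _ => cut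
  | i :: rest, cut, runs =>
    if pvBHit f i then
      (if runs + 1 == 2 then i else pvBScan f rest i (runs + 1))
    else pvBScan f rest cut runs

-- k = len(second); for j, c in enumerate(second): if c in VOWELS: k = j; break
def pvBFind : List (Int × Char) → Int → Int
  | [], d => d
  | p :: rest, d => if pvVowel p.2 then p.1 else pvBFind rest d

def brangelina_alt (first : String) (second : String) : String :=
  let f := first.toList
  let cut := pvBScan f (PySem.List.pyRange ((f.length : Int) - 1) (-1) (-1)) 0 0
  let k := pvBFind (PySem.List.enumerate second.toList 0) (second.toList.length : Int)
  String.ofList (PySem.List.slice f none (some cut) ++ PySem.List.slice second.toList (some k) none)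

-- ===== PRECONDITION & SPEC =====
-- Pre_ excludes exactly the inputs where the Python A raises IndexError:
-- a second with no vowel (the while loop runs off the end) or a first with no vowel (groups[-2] on []).
def Pre_brangelina (first : String) (second : String) : Prop :=
  first.toList.any pvVowel = true ∧ second.toList.any pvVowel = true
instance (first : String) (second : String) : Decidable (Pre_brangelina first second) := by
  unfold Pre_brangelina; infer_instance

def pvWitness_brangelina : String × String := ("brad", "angelina")

def Spec_brangelina (first : String) (second : String) (out : String) : Prop := out = brangelina_alt first second
instance (first : String) (second : String) (out : String) : Decidable (Spec_brangelina first second out) := by unfold Spec_brangelina; infer_instance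

-- ===== CLAIM (what is proved, stated in full; the proofs are below) =====
def Claim_equal_brangelina : Prop := ∀ (first : String) (second : String), Dom_brangelina first second → Pre_brangelina first second → Spec_brangelina first second (brangelina first second)

-- ===== LEMMAS AND PROOFS =====

-- predecessor character of position k in f ('#' sentinel before position 0)
def pvPred (f : List Char) (k : Nat) : Char := if k = 0 then '#' else f.getD (k - 1) ' '

-- B's early-exit result as a function of the filtered hit list
def pvPick : List Int → Int → Int
  | [], cut => cut
  | [a], _ => a
  | _ :: b :: _, _ => b

-- B's first-vowel search equals A's, with a default
theorem pvBFind_eq (l : List Char) (i d : Int) :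
    pvBFind (PySem.List.enumerate l i) d = (pvAFind l i).getD d := by
  induction l generalizing i with
  | nil => simp [pvBFind, pvAFind, PySem.List.enumerate_nil]
  | cons c cs ih =>
    rw [PySem.List.enumerate_cons]
    by_cases h : pvVowel c <;> simp [pvBFind, pvAFind, h, ih]

theorem pvAFind_isSome (l : List Char) (i : Int) (h : l.any pvVowel = true) :
    (pvAFind l i).isSome := by
  induction l generalizing i with
  | nil => simp at h
  | cons c cs ih =>
    by_cases hc : pvVowel c
    · simp [pvAFind, hc]
    · rw [List.any_cons] at h
      simp only [hc, Bool.false_or] at h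
      simp [pvAFind, hc, ih _ h]

-- the scan at runs = 1 returns the first remaining hit (or the carried cut)
theorem pvBScan_one (f : List Char) (l : List Int) (cut : Int) :
    pvBScan f l cut 1 = ((l.filter (pvBHit f)).head?).getD cut := by
  induction l generalizing cut with
  | nil => simp [pvBScan]
  | cons i rest ih =>
    by_cases h : pvBHit f i <;> simp [pvBScan, h, ih, List.filter]

-- the scan at runs = 0 returns pvPick of the hit list
theorem pvBScan_zero (f : List Char) (l : List Int) (cut : Int) :
    pvBScan f l cut 0 = pvPick (l.filter (pvBHit f)) cut := by
  induction l generalizing cut with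
  | nil => simp [pvBScan, pvPick]
  | cons i rest ih =>
    by_cases h : pvBHit f i
    · have : pvBScan f (i :: rest) cut 0 = pvBScan f rest i 1 := by simp [pvBScan, h]
      rw [this, pvBScan_one]
      rcases hf : rest.filter (pvBHit f) with _ | ⟨b, t⟩ <;>
        simp [List.filter, h, hf, pvPick]
    · simp [pvBScan, h, ih, List.filter]

-- A's flag loop equals the predecessor-pair filter (flag = "previous char is a vowel")
theorem pvAGroups_eq_filter (l : List Char) (p : Char) (i : Int) (g : List Int) :
    pvAGroups l i (pvVowel p) g =
      g ++ ((PySem.List.enumerate ((p :: l).zip l) i).filter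
        (fun q => pvVowel q.2.2 && !pvVowel q.2.1)).map (·.1) := by
  induction l generalizing p i g with
  | nil => simp [pvAGroups, PySem.List.enumerate_nil]
  | cons c cs ih =>
    have hz : (p :: c :: cs).zip (c :: cs) = (p, c) :: (c :: cs).zip cs := rfl
    rw [hz, PySem.List.enumerate_cons]
    by_cases hc : pvVowel c
    · by_cases hp : pvVowel p
      · have : pvAGroups (c :: cs) i (pvVowel p) g = pvAGroups cs (i + 1) true g := by
          simp [pvAGroups, hc, hp]
        rw [this, ← hc, ih c (i + 1) g]
        simp [List.filter, hc, hp]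
      · have : pvAGroups (c :: cs) i (pvVowel p) g = pvAGroups cs (i + 1) true (g ++ [i]) := by
          simp [pvAGroups, hc, hp]
        rw [this, ← hc, ih c (i + 1) (g ++ [i])]
        simp [List.filter, hc, hp]
    · have : pvAGroups (c :: cs) i (pvVowel p) g = pvAGroups cs (i + 1) false g := by
        simp [pvAGroups, hc]
      rw [this, show false = pvVowel c by simp [hc], ih c (i + 1) g]
      simp [List.filter, hc]

-- the loop test at a valid Nat index, in terms of the character and its predecessor
theorem pvBHit_nat (f : List Char) (k : Nat) (hk : k < f.length) :
    pvBHit f (k : Int) = (pvVowel f[k] && !pvVowel (pvPred f k)) := by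
  unfold pvBHit pvPred
  have hv : pvVowel '#' = false := by decide
  by_cases h0 : k = 0
  · subst h0
    simp [PySem.List.pyGetD_zero, List.getD, List.getElem?_eq_getElem hk, hv]
  · have h1 : ((k : Int) == 0) = false := by simp; omega
    have h2 : (k : Int) - 1 = ((k - 1 : Nat) : Int) := by omega
    rw [h1, h2]
    simp [h0, List.getD, List.getElem?_eq_getElem hk,
      List.getElem?_eq_getElem (by omega : k - 1 < f.length)]

theorem pvKey (f : List Char) (k : Nat) (hk : k ≤ f.length) :
    (PySem.List.pyRange (k : Int) (f.length : Int) 1).filter (pvBHit f)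
      = ((PySem.List.enumerate ((pvPred f k :: f.drop k).zip (f.drop k)) (k : Int)).filter
          (fun q => pvVowel q.2.2 && !pvVowel q.2.1)).map (·.1) := by
  induction hgen : f.length - k generalizing k with
  | zero =>
    have hk' : k = f.length := by omega
    subst hk'
    rw [PySem.List.pyRange_one_eq_nil (by omega), List.drop_length]
    simp [PySem.List.enumerate_nil]
  | succ n ih =>
    have hlt : k < f.length := by omega
    rw [PySem.List.pyRange_one_cons (by exact_mod_cast hlt)]
    rw [show f.drop k = f[k] :: f.drop (k+1) from (List.getElem_cons_drop hlt).symm]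
    rw [show (pvPred f k :: f[k] :: f.drop (k+1)).zip (f[k] :: f.drop (k+1))
          = (pvPred f k, f[k]) :: (f[k] :: f.drop (k+1)).zip (f.drop (k+1)) from rfl]
    rw [PySem.List.enumerate_cons, List.filter_cons, List.filter_cons]
    have hpred : pvPred f (k+1) = f[k] := by
      unfold pvPred
      simp [List.getD, List.getElem?_eq_getElem hlt]
    have hih := ih (k+1) (by omega) (by omega)
    rw [hpred] at hih
    have hcast : (k : Int) + 1 = ((k + 1 : Nat) : Int) := by omega
    rw [hcast, hih, pvBHit_nat f k hlt]
    by_cases hc : pvVowel f[k] && !pvVowel (pvPred f k) <;> simp [hc]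


-- ===== VERDICT (by name: the statement is the Claim_ definition above) =====
-- the hit list over all indices, reversed, is what B scans; its pick is A's choice
theorem pvGroups_eq_hits (f : List Char) :
    pvAGroups f 0 false [] = (PySem.List.pyRange 0 (f.length : Int) 1).filter (pvBHit f) := by
  have h1 := pvAGroups_eq_filter f '#' 0 []
  rw [show pvVowel '#' = false by decide] at h1
  have h2 := pvKey f 0 (Nat.zero_le _)
  simp only [Nat.cast_zero, List.drop_zero] at h2
  rw [h1, h2, show pvPred f 0 = '#' from rfl]
  simp

theorem brangelina_spec : Claim_equal_brangelina := by
  intro first second _ hpre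
  obtain ⟨hf, hs⟩ := hpre
  unfold Spec_brangelina brangelina brangelina_alt
  obtain ⟨j, hj⟩ := Option.isSome_iff_exists.mp (pvAFind_isSome second.toList 0 hs)
  have hk : pvBFind (PySem.List.enumerate second.toList 0) (second.toList.length : Int) = j := by
    rw [pvBFind_eq, hj]; rfl
  have hrev : PySem.List.pyRange ((first.toList.length : Int) - 1) (-1) (-1)
      = (PySem.List.pyRange 0 (first.toList.length : Int) 1).reverse := by
    rw [PySem.List.pyRange_neg_one_eq_reverse]; norm_num
  have hcut : pvBScan first.toList
        (PySem.List.pyRange ((first.toList.length : Int) - 1) (-1) (-1)) 0 0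
      = pvPick (pvAGroups first.toList 0 false []).reverse 0 := by
    rw [hrev, pvBScan_zero, List.filter_reverse, ← pvGroups_eq_hits]
  simp only [hj, hk, hcut, Option.getD_some]
  set G := pvAGroups first.toList 0 false [] with hGdef
  rcases hGr : G.reverse with _ | ⟨x, _ | ⟨y, t⟩⟩
  · have hG0 : G = [] := by simpa using congrArg List.reverse hGr
    rw [hG0]
    rfl
  · have hG1 : G = [x] := by simpa using congrArg List.reverse hGr
    rw [hG1]
    rfl
  · have hG2 : G = t.reverse ++ [y, x] := by simpa using congrArg List.reverse hGr
    have hlen : G.length = t.length + 2 := by rw [hG2]; simp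
    have hne : (G.length == 1) = false := by simp [hlen]
    have hA : PySem.List.pyGet? G (-2) = some y := by
      rw [PySem.List.pyGet?_neg_ofNat G 2 (by omega) (by omega), hG2]
      rw [show (t.reverse ++ [y, x]).length - 2 = t.reverse.length by simp]
      rw [List.getElem?_append_right (le_refl _)]
      simp
    rw [hne, hA]
    rfl
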